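-- pv_equiv track=rewrite | github.com/uSFrances/ndp-sim | address_remapping/src/address_remapping/model_parser.py | _resolve_output_shape
-- ===== SOURCE A (Python) =====
-- from typing import Dict, List, Optional, Sequence, Tuple
--
-- class ModelSpecError(ValueError):
--     pass
--
-- def _resolve_output_shape(output_shape: Dict[str, str], local_input_resolved: Dict[str, Dict[str, int]]) -> Dict[str, int]:
--     resolved: Dict[str, int] = {}
--     available: Dict[str, int] = {}
--     for port_shape in local_input_resolved.values():
--         available.update(port_shape)
--     for axis_name, expr in output_shape.items():
--         if expr not in available:
--             raise ModelSpecError(f"Cannot resolve output axis '{axis_name}' from expression '{expr}'.")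
--         resolved[axis_name] = available[expr]
--     return resolved
-- ===== SOURCE B (Python) =====
-- from typing import Dict
--
--
-- class ModelSpecError(ValueError):
--     pass
--
--
-- def _resolve_output_shape(output_shape: Dict[str, str], local_input_resolved: Dict[str, Dict[str, int]]) -> Dict[str, int]:
--     resolved: Dict[str, int] = {}
--     for axis_name, expr in output_shape.items():
--         value = None
--         found = False
--         for port_shape in local_input_resolved.values():
--             if expr in port_shape:
--                 value = port_shape[expr]
--                 found = True
--         if not found:
--             raise ModelSpecError(f"Cannot resolve output axis '{axis_name}' from expression '{expr}'.")
--         resolved[axis_name] = value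
--     return resolved
-- ===== Notes on version B (the rewrite author's own statement) =====
-- stated objective: alternative
-- what changed: B drops A's pre-merged 'available' dict and instead, for each output axis, scans every port shape directly, keeping the last port that defines the expression (matching A's update-overwrite semantics).
import Mathlib
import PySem

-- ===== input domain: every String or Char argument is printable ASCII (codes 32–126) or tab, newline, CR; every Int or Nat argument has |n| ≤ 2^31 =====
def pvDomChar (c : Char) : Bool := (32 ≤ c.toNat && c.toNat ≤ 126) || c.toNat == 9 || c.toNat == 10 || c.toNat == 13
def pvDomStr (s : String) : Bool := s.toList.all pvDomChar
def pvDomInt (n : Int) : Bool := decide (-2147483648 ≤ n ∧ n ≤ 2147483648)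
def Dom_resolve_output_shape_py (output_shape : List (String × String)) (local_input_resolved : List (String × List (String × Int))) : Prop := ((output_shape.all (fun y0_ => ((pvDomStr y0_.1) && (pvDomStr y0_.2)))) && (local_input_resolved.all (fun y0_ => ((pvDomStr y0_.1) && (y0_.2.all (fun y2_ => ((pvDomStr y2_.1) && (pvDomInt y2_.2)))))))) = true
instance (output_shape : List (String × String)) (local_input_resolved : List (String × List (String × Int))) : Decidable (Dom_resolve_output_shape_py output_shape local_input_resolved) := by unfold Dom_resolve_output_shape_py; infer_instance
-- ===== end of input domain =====

-- B drops A's pre-merged `available` dict and instead scans every port shape per output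
-- axis, keeping the last port that defines the expression (alternative decomposition,
-- same return value wherever A returns).

-- ===== PORT A =====
-- available.update(port_shape) for each port, then one lookup per output axis.
def resolve_output_shape_py (output_shape : List (String × String)) (local_input_resolved : List (String × List (String × Int))) : List (String × Int) :=
  let available : PySem.Dict String Int :=
    local_input_resolved.foldl (fun d q => d.update q.2) PySem.Dict.empty
  let resolved : PySem.Dict String Int :=
    output_shape.foldl
      (fun r p =>
        if available.contains p.2 then r.insert p.1 (available.getD p.2 0)
        else r)  -- Python raises ModelSpecError here; excluded by Pre_
      PySem.Dict.empty
  resolved.items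

-- ===== PORT B =====
-- last value bound to key e in the pair list l (dict semantics: a later binding wins)
def pvLastLookup (l : List (String × Int)) (e : String) : Option Int :=
  l.foldl (fun a kv => if kv.1 == e then some kv.2 else a) none

def resolve_output_shape_py_alt (output_shape : List (String × String)) (local_input_resolved : List (String × List (String × Int))) : List (String × Int) :=
  let resolved : PySem.Dict String Int :=
    output_shape.foldl
      (fun r p =>
        match local_input_resolved.foldl
            (fun acc q => match pvLastLookup q.2 p.2 with
              | some v => some v
              | none => acc) none with
        | some v => r.insert p.1 v
        | none => r)  -- Python raises ModelSpecError here; excluded by Pre_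
      PySem.Dict.empty
  resolved.items

-- ===== PRECONDITION & SPEC =====
-- Pre_ excludes exactly the inputs where A raises ModelSpecError: some output-axis
-- expression that names no axis of any port shape.
def Pre_resolve_output_shape_py (output_shape : List (String × String)) (local_input_resolved : List (String × List (String × Int))) : Prop :=
  ∀ p ∈ output_shape, ∃ q ∈ local_input_resolved, ∃ r ∈ q.2, r.1 = p.2
instance (output_shape : List (String × String)) (local_input_resolved : List (String × List (String × Int))) : Decidable (Pre_resolve_output_shape_py output_shape local_input_resolved) := by unfold Pre_resolve_output_shape_py; infer_instance

def pvWitness_resolve_output_shape_py : (List (String × String)) × (List (String × List (String × Int))) :=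
  ([("x", "a"), ("y", "b")], [("p", [("a", 1)]), ("q", [("b", 2), ("a", 3)])])

def Spec_resolve_output_shape_py (output_shape : List (String × String)) (local_input_resolved : List (String × List (String × Int))) (out : List (String × Int)) : Prop := out = resolve_output_shape_py_alt output_shape local_input_resolved
instance (output_shape : List (String × String)) (local_input_resolved : List (String × List (String × Int))) (out : List (String × Int)) : Decidable (Spec_resolve_output_shape_py output_shape local_input_resolved out) := by unfold Spec_resolve_output_shape_py; infer_instance

-- ===== CLAIM (what is proved, stated in full; the proofs are below) =====
def Claim_equal_resolve_output_shape_py : Prop := ∀ (output_shape : List (String × String)) (local_input_resolved : List (String × List (String × Int))), Dom_resolve_output_shape_py output_shape local_input_resolved → Pre_resolve_output_shape_py output_shape local_input_resolved → Spec_resolve_output_shape_py output_shape local_input_resolved (resolve_output_shape_py output_shape local_input_resolved)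

-- ===== LEMMAS AND PROOFS =====

-- the last-match scan over a pair list, started from x instead of none
theorem scan_init (l : List (String × Int)) (e : String) (x : Option Int) :
    l.foldl (fun a kv => if kv.1 == e then some kv.2 else a) x
      = (match pvLastLookup l e with | some v => some v | none => x) := by
  induction l generalizing x with
  | nil => simp [pvLastLookup]
  | cons kv l ih =>
    simp only [pvLastLookup, List.foldl_cons]
    rw [ih, ih]
    cases pvLastLookup l e <;> by_cases h : kv.1 == e <;> simp [h]

-- folding insert over a pair list, then looking up, is the last-match scan
theorem update_get?_eq (l : List (String × Int)) (d : PySem.Dict String Int) (e : String) :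
    (d.update l).get? e = (match pvLastLookup l e with | some v => some v | none => d.get? e) := by
  induction l generalizing d with
  | nil => simp [PySem.Dict.update, pvLastLookup]
  | cons kv l ih =>
    simp only [PySem.Dict.update, List.foldl_cons] at *
    rw [ih]
    have h1 : pvLastLookup (kv :: l) e
        = (match pvLastLookup l e with | some v => some v | none => if kv.1 == e then some kv.2 else none) := by
      simp only [pvLastLookup, List.foldl_cons]
      simpa [pvLastLookup] using scan_init l e (if kv.1 == e then some kv.2 else none)
    rw [h1, PySem.Dict.get?_insert]
    cases pvLastLookup l e <;> by_cases h : kv.1 = e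
    · simp [h]
    · simp [h, Ne.symm h]
    · simp
    · simp
-- A's merged-available lookup equals B's last-port scan, for any start dict
theorem available_get?_eq (lir : List (String × List (String × Int))) (d : PySem.Dict String Int) (e : String) :
    (lir.foldl (fun d q => d.update q.2) d).get? e =
      lir.foldl (fun acc q => match pvLastLookup q.2 e with | some v => some v | none => acc) (d.get? e) := by
  induction lir generalizing d with
  | nil => rfl
  | cons q lir ih =>
    simp only [List.foldl_cons]
    rw [ih, update_get?_eq]

-- ===== VERDICT (by name: the statement is the Claim_ definition above) =====
theorem resolve_output_shape_py_spec : Claim_equal_resolve_output_shape_py := by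
  intro os lir _ _
  unfold Spec_resolve_output_shape_py
  simp only [resolve_output_shape_py, resolve_output_shape_py_alt]
  have hfun : (fun (r : PySem.Dict String Int) (p : String × String) =>
      if (lir.foldl (fun d q => d.update q.2) PySem.Dict.empty).contains p.2 then
        r.insert p.1 ((lir.foldl (fun d q => d.update q.2) PySem.Dict.empty).getD p.2 0)
      else r)
    = (fun (r : PySem.Dict String Int) (p : String × String) =>
        match lir.foldl (fun acc q => match pvLastLookup q.2 p.2 with | some v => some v | none => acc) none with
        | some v => r.insert p.1 v
        | none => r) := by
    funext r p
    have hg := available_get?_eq lir PySem.Dict.empty p.2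
    have hc := PySem.Dict.contains_eq_isSome_get? (lir.foldl (fun d q => d.update q.2) PySem.Dict.empty) p.2
    have hd := PySem.Dict.getD_eq_get?_getD (lir.foldl (fun d q => d.update q.2) PySem.Dict.empty) p.2 (0 : Int)
    have hemp : (PySem.Dict.empty : PySem.Dict String Int).get? p.2 = none := by simp
    rw [hemp] at hg
    cases hx : lir.foldl (fun acc q => match pvLastLookup q.2 p.2 with | some v => some v | none => acc) none <;>
      rw [hx] at hg <;> simp [hc, hd, hg]
  rw [hfun]
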